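-- pv_equiv track=rewrite | github.com/vigusmao/ED_2021_2 | celebridade.py | criarFesta
-- ===== SOURCE A (Python) =====
-- def criarFesta(n, celebridade):
--     A = [None] * n
--     for i in range(n):
--         linha = [False] * n
-- ##        for j in range(n):
-- ##            if random() < 0.5:
-- ##                linha[j] = True
--         A[i] = linha
--
--     if celebridade is not None:
--         for x in range(n):
--             A[celebridade][x] = False
--             A[x][celebridade] = True
--
--     return A
-- ===== SOURCE B (Python) =====
-- def criarFesta(n, celebridade):
--     if celebridade is None or n <= 0:
--         return [[False] * n for _ in range(n)]
--     linha = [False] * n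
--     linha[celebridade] = True
--     return [linha[:] for _ in range(n)]
-- ===== Notes on version B (the rewrite author's own statement) =====
-- stated objective: simpler
-- what changed: B builds the celebrity row once ([False]*n with the celebrity column set True) and returns n copies of it, replacing A's preallocate-all-False-then-mutate loop that rewrites two cells per iteration; when there is no celebrity (or n <= 0) it directly returns the all-False matrix.
import Mathlib
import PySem

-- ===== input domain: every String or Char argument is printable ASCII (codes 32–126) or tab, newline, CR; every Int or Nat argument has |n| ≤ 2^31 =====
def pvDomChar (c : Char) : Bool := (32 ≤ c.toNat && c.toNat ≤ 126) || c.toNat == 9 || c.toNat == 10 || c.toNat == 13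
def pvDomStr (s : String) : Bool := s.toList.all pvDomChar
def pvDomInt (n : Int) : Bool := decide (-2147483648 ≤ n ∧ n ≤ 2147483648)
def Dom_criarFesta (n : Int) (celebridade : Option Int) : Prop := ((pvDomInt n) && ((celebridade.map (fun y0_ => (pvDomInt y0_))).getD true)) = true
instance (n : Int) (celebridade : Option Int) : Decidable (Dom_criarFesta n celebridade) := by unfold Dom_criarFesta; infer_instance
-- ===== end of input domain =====

-- B builds the single shared row directly and replicates it, instead of A's
-- all-False preallocation followed by a mutation loop; return values proved equal on Pre_.

-- ===== PORT A =====
-- A = [None]*n; for i in range(n): A[i] = [False]*n   (preallocate-and-fill, rendered as a map over the same range)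
-- then the mutation loop: for x in range(n): A[celebridade][x] = False; A[x][celebridade] = True
def criarFesta (n : Int) (celebridade : Option Int) : List (List Bool) :=
  let A : List (List Bool) :=
    (PySem.List.pyRange 0 n 1).map (fun _i => List.replicate n.toNat false)
  match celebridade with
  | none => A
  | some c =>
      (PySem.List.pyRange 0 n 1).foldl (fun A x =>
        -- A[celebridade][x] = False  (read row, set cell, write row back)
        let A := PySem.List.pySetD A c (PySem.List.pySetD (PySem.List.pyGetD A c []) x false)
        -- A[x][celebridade] = True
        PySem.List.pySetD A x (PySem.List.pySetD (PySem.List.pyGetD A x []) c true)) A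

-- ===== PORT B =====
def criarFesta_alt (n : Int) (celebridade : Option Int) : List (List Bool) :=
  match celebridade with
  | none => List.replicate n.toNat (List.replicate n.toNat false)
  | some c =>
      if n ≤ 0 then List.replicate n.toNat (List.replicate n.toNat false)
      else
        let linha := PySem.List.pySetD (List.replicate n.toNat false) c true
        List.replicate n.toNat linha

-- ===== PRECONDITION & SPEC =====
-- Pre_ excludes exactly the inputs where the Python A raises IndexError
-- (a celebrity index out of range for a non-empty party); B raises there too.
def Pre_criarFesta (n : Int) (celebridade : Option Int) : Prop :=
  ∀ c ∈ celebridade, n ≤ 0 ∨ (-n ≤ c ∧ c < n)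

instance (n : Int) (celebridade : Option Int) : Decidable (Pre_criarFesta n celebridade) := by
  unfold Pre_criarFesta; infer_instance

def pvWitness_criarFesta : Int × Option Int := (3, some (-1))

def Spec_criarFesta (n : Int) (celebridade : Option Int) (out : List (List Bool)) : Prop := out = criarFesta_alt n celebridade
instance (n : Int) (celebridade : Option Int) (out : List (List Bool)) : Decidable (Spec_criarFesta n celebridade out) := by unfold Spec_criarFesta; infer_instance

-- ===== CLAIM (what is proved, stated in full; the proofs are below) =====
def Claim_equal_criarFesta : Prop := ∀ (n : Int) (celebridade : Option Int), Dom_criarFesta n celebridade → Pre_criarFesta n celebridade → Spec_criarFesta n celebridade (criarFesta n celebridade)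


-- ===== LEMMAS AND PROOFS =====

-- resolved (non-negative) form of a Python index c into a list of length n.toNat
def pvK (n c : Int) : Nat := (if c < 0 then c + n else c).toNat

theorem pvK_lt (n c : Int) (h3 : 0 < n) (_h1 : -n ≤ c) (h2 : c < n) : pvK n c < n.toNat := by
  unfold pvK; split <;> omega

theorem pySetD_neg' {α : Type} (xs : List α) (i : Int) (v : α) (h0 : i < 0) (h1 : 0 ≤ i + xs.length) :
    PySem.List.pySetD xs i v = xs.set (i + xs.length).toNat v := by
  have hneg : ¬ 0 ≤ i := by omega
  have h2 : -(xs.length : Int) ≤ i := by omega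
  have h3 : xs.length - (-i).toNat = (i + xs.length).toNat := by omega
  simp [PySem.List.pySetD, PySem.List.pySet?, PySem.List.pyIdx?, hneg, h2, h3]

theorem pyGetD_neg' {α : Type} (xs : List α) (i : Int) (d : α) (h0 : i < 0) (h1 : 0 ≤ i + xs.length) :
    PySem.List.pyGetD xs i d = xs.getD (i + xs.length).toNat d := by
  have hneg : ¬ 0 ≤ i := by omega
  have h2 : -(xs.length : Int) ≤ i := by omega
  have h3 : xs.length - (-i).toNat = (i + xs.length).toNat := by omega
  simp [PySem.List.pyGetD, PySem.List.pyGet?, PySem.List.pyIdx?, hneg, h2, h3]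

theorem resolve_set {α : Type} (xs : List α) (n c : Int) (v : α)
    (hlen : xs.length = n.toNat) (h3 : 0 < n) (_h1 : -n ≤ c) (_h2 : c < n) :
    PySem.List.pySetD xs c v = xs.set (pvK n c) v := by
  by_cases hc : c < 0
  · rw [pySetD_neg' xs c v hc (by rw [hlen]; omega)]
    congr 1
    unfold pvK
    rw [hlen]
    split <;> omega
  · rw [PySem.List.pySetD_of_nonneg xs v (by omega : (0:Int) ≤ c)]
    congr 1
    unfold pvK
    split <;> omega

theorem resolve_get {α : Type} (xs : List α) (n c : Int) (d : α)
    (hlen : xs.length = n.toNat) (h3 : 0 < n) (h1 : -n ≤ c) (h2 : c < n) :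
    PySem.List.pyGetD xs c d = xs.getD (pvK n c) d := by
  by_cases hc : c < 0
  · rw [pyGetD_neg' xs c d hc (by rw [hlen]; omega)]
    congr 1
    unfold pvK
    rw [hlen]
    split <;> omega
  · rw [PySem.List.pyGetD_eq_getElem xs d (by omega : (0:Int) ≤ c) (by rw [hlen]; omega)]
    rw [List.getD_eq_getElem xs d (by unfold pvK; rw [hlen]; split <;> omega)]
    congr 1
    unfold pvK
    split <;> omega

-- the celebrity row and the loop invariant state: first t rows rewritten, the rest still all-False
def pvR (m k : Nat) : List Bool := (List.replicate m false).set k true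

def pvState (m k t : Nat) : List (List Bool) :=
  List.replicate t (pvR m k) ++ List.replicate (m - t) (List.replicate m false)

theorem length_pvState (m k t : Nat) (h : t ≤ m) : (pvState m k t).length = m := by
  simp [pvState]; omega

theorem pvR_set_false (m k t : Nat) (h : t ≠ k) : (pvR m k).set t false = pvR m k := by
  unfold pvR
  apply List.ext_getElem (by simp)
  intro i h1 h2
  simp only [List.getElem_set, List.getElem_replicate]
  split_ifs <;> simp_all

theorem pvState_getD (m k t : Nat) (hk : k < m) (ht : t ≤ m) :
    (pvState m k t).getD k [] = if k < t then pvR m k else List.replicate m false := by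
  rw [List.getD_eq_getElem _ _ (by rw [length_pvState m k t ht]; exact hk)]
  unfold pvState
  by_cases h : k < t
  · rw [List.getElem_append_left (by simpa using h)]
    simp [h]
  · rw [List.getElem_append_right (by simpa using h)]
    simp only [List.length_replicate]
    rw [List.getElem_replicate]
    simp [h]

theorem pvState_set_self (m k t : Nat) (hk : k < m) (ht : t ≤ m) :
    (pvState m k t).set k ((pvState m k t).getD k []) = pvState m k t := by
  have hlen : k < (pvState m k t).length := by rw [length_pvState m k t ht]; exact hk
  rw [List.getD_eq_getElem _ _ hlen]
  exact List.set_getElem_self hlen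

theorem pvState_set_next (m k t : Nat) (ht : t < m) :
    (pvState m k t).set t (pvR m k) = pvState m k (t + 1) := by
  unfold pvState
  rw [List.set_append_right t (pvR m k) (by simp)]
  simp only [List.length_replicate, Nat.sub_self]
  have : m - t = (m - (t + 1)) + 1 := by omega
  rw [this, List.replicate_succ, List.set_cons_zero, List.replicate_succ']
  simp

-- one iteration of A's mutation loop sends state t to state (t+1)
theorem pvStep (n c : Int) (m k : Nat) (hm : m = n.toNat) (hkk : k = pvK n c)
    (h3 : 0 < n) (h1 : -n ≤ c) (h2 : c < n) (t : Nat) (ht : t < m) :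
    (PySem.List.pySetD
        (PySem.List.pySetD (pvState m k t) c
          (PySem.List.pySetD (PySem.List.pyGetD (pvState m k t) c []) ((t : Nat) : Int) false))
        ((t : Nat) : Int)
        (PySem.List.pySetD
          (PySem.List.pyGetD
            (PySem.List.pySetD (pvState m k t) c
              (PySem.List.pySetD (PySem.List.pyGetD (pvState m k t) c []) ((t : Nat) : Int) false))
            ((t : Nat) : Int) []) c true)) = pvState m k (t + 1) := by
  have hk : k < m := hm ▸ hkk ▸ pvK_lt n c h3 h1 h2
  have htle : t ≤ m := Nat.le_of_lt ht
  have hlen : (pvState m k t).length = n.toNat := by rw [length_pvState m k t htle, hm]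
  -- the row A[c], with A[c][t] := False, is unchanged
  have hrow : PySem.List.pySetD (PySem.List.pyGetD (pvState m k t) c []) ((t : Nat) : Int) false
      = (pvState m k t).getD k [] := by
    rw [resolve_get _ n c _ hlen h3 h1 h2, ← hkk, PySem.List.pySetD_natCast]
    rw [pvState_getD m k t hk htle]
    by_cases h : k < t
    · simp only [h, if_true]
      exact pvR_set_false m k t (by omega)
    · simp only [h, if_false]
      exact List.set_replicate_self
  -- hence writing it back leaves the state unchanged
  have hwrite : PySem.List.pySetD (pvState m k t) c
      (PySem.List.pySetD (PySem.List.pyGetD (pvState m k t) c []) ((t : Nat) : Int) false)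
      = pvState m k t := by
    rw [hrow, resolve_set _ n c _ hlen h3 h1 h2, ← hkk]
    exact pvState_set_self m k t hk htle
  rw [hwrite]
  -- the second write: row t (still all-False) gets column k set to True
  have hrowt : PySem.List.pyGetD (pvState m k t) ((t : Nat) : Int) [] = List.replicate m false := by
    rw [PySem.List.pyGetD_natCast]
    unfold pvState
    rw [List.getD_eq_getElem _ _ (by simp; omega)]
    rw [List.getElem_append_right (by simp)]
    simp only [List.length_replicate, Nat.sub_self]
    rw [List.getElem_replicate]
  rw [hrowt]
  have hR : PySem.List.pySetD (List.replicate m false) c true = pvR m k := by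
    rw [resolve_set _ n c _ (by simp [hm]) h3 h1 h2, ← hkk]
    rfl
  rw [hR, PySem.List.pySetD_natCast]
  exact pvState_set_next m k t ht

-- folding A's loop body over range(t, t+j) sends state t to state (t+j)
theorem pvFold (n c : Int) (m k : Nat) (hm : m = n.toNat) (hkk : k = pvK n c)
    (h3 : 0 < n) (h1 : -n ≤ c) (h2 : c < n) :
    ∀ (j t : Nat), t + j ≤ m →
    (PySem.List.pyRange (t : Int) ((t : Int) + (j : Int)) 1).foldl
      (fun A x =>
        PySem.List.pySetD
          (PySem.List.pySetD A c (PySem.List.pySetD (PySem.List.pyGetD A c []) x false)) x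
          (PySem.List.pySetD
            (PySem.List.pyGetD
              (PySem.List.pySetD A c (PySem.List.pySetD (PySem.List.pyGetD A c []) x false)) x [])
            c true))
      (pvState m k t) = pvState m k (t + j) := by
  intro j
  induction j with
  | zero =>
    intro t _
    rw [PySem.List.pyRange_one_eq_nil (by omega)]
    simp
  | succ j ih =>
    intro t hle
    have hsplit : ((t : Int) + ((j : Nat) + 1 : Nat)) = ((t : Int) + (j : Int)) + 1 := by push_cast; ring
    rw [hsplit, PySem.List.pyRange_one_succ_right (by omega)]
    rw [List.foldl_append]
    rw [ih t (by omega)]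
    have hcast : (t : Int) + (j : Int) = (((t + j : Nat) : Nat) : Int) := by push_cast; ring
    simp only [List.foldl_cons, List.foldl_nil]
    rw [hcast]
    rw [pvStep n c m k hm hkk h3 h1 h2 (t + j) (by omega)]
    congr 1


-- ===== VERDICT (by name: the statement is the Claim_ definition above) =====
theorem criarFesta_spec : Claim_equal_criarFesta := by
  intro n celebridade _hdom hpre
  unfold Spec_criarFesta criarFesta criarFesta_alt
  cases celebridade with
  | none =>
    simp only []
    rw [List.map_const', PySem.List.length_pyRange_one]
    congr 1
    omega
  | some c =>
    have hc := hpre c rfl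
    by_cases hn : n ≤ 0
    · rw [PySem.List.pyRange_one_eq_nil (by omega)]
      simp [hn]
    · have h3 : 0 < n := by omega
      obtain h1 : -n ≤ c := by rcases hc with h | h; omega; exact h.1
      obtain h2 : c < n := by rcases hc with h | h; omega; exact h.2
      simp only [if_neg hn]
      set m := n.toNat with hm
      set k := pvK n c with hkk
      have hinit : (PySem.List.pyRange 0 n 1).map (fun _i => List.replicate m false)
          = pvState m k 0 := by
        rw [List.map_const', PySem.List.length_pyRange_one]
        unfold pvState
        simp only [List.replicate_zero, List.nil_append, Nat.sub_zero]
        congr 1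
        omega
      rw [hinit]
      have hrange : PySem.List.pyRange 0 n 1 = PySem.List.pyRange ((0 : Nat) : Int) (((0 : Nat) : Int) + (m : Int)) 1 := by
        congr 1
        omega
      rw [hrange, pvFold n c m k hm.symm hkk h3 h1 h2 m 0 (by omega)]
      have hR : PySem.List.pySetD (List.replicate m false) c true = pvR m k := by
        rw [resolve_set _ n c _ (by simp [hm]) h3 h1 h2, ← hkk]
        rfl
      rw [hR]
      unfold pvState
      simp
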